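-- pv_equiv track=rewrite | github.com/mthlinn/AS_Python_1sem | 2.3lab/main.py | get_matrix_info
-- ===== SOURCE A (Python) =====
-- def get_matrix_info(A):
--     """Получить информацию о матрице"""
--     if not A:
--         return "Пустая матрица"
--
--     M = len(A)
--     N = len(A[0]) if A else 0
--
--     # Проверка, является ли матрица квадратной
--     is_square = M == N
--
--     # Находим минимальное и максимальное значения
--     flat_values = [elem for row in A for elem in row]
--     min_val = min(flat_values) if flat_values else None
--     max_val = max(flat_values) if flat_values else None
--     sum_val = sum(flat_values) if flat_values else None
--
--     info = f"Размер: {M}×{N}"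
--     if is_square:
--         info += " (квадратная)"
--
--     if min_val is not None:
--         info += f"\nMin: {min_val}, Max: {max_val}, Sum: {sum_val}"
--
--     return info
-- ===== SOURCE B (Python) =====
-- def get_matrix_info(A):
--     """Получить информацию о матрице"""
--     if not A:
--         return "Пустая матрица"
--
--     M, N = len(A), len(A[0])
--
--     # Sort all elements once: the extremes are the endpoints of the sorted
--     # list, instead of separate min()/max() scans over a flattened copy.
--     ordered = sorted(x for row in A for x in row)
--
--     info = f"Размер: {M}×{N}"
--     if M == N:
--         info += " (квадратная)"
--
--     if ordered:
--         info += f"\nMin: {ordered[0]}, Max: {ordered[-1]}, Sum: {sum(ordered)}"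
--
--     return info
-- ===== Notes on version B (the rewrite author's own statement) =====
-- stated objective: alternative
-- what changed: B sorts all elements once and reads Min/Max off the two endpoints of the sorted list (summing it for Sum), instead of A's flattened copy aggregated by three separate min()/max()/sum() scans.
import Mathlib
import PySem

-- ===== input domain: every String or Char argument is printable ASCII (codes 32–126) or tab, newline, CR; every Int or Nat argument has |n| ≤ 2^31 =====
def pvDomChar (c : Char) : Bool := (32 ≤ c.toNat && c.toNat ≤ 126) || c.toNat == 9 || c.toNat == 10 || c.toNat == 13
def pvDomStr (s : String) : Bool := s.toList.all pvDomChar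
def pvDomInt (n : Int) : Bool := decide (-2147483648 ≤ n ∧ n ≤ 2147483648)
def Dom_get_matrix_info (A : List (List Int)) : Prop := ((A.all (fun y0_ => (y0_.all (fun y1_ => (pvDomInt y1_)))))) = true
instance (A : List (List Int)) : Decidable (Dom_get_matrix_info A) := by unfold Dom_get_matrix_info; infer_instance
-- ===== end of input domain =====

-- B sorts the elements once and reads Min/Max off the endpoints of the sorted list
-- (summing it for Sum) instead of A's flatten + three separate min/max/sum scans.

-- ===== PORT A =====
def get_matrix_info (A : List (List Int)) : String :=
  if A = [] then "Пустая матрица" else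
  let M : Int := A.length
  let N : Int := (A.headD []).length
  let is_square := M == N
  let flat_values := A.flatMap id
  let min_val := PySem.List.min? flat_values (fun x => x)
  let max_val := PySem.List.max? flat_values (fun x => x)
  let sum_val : Option Int := if flat_values = [] then none else some (flat_values.foldl (· + ·) 0)
  let info := "Размер: " ++ PySem.Int.toStr M ++ "×" ++ PySem.Int.toStr N
  let info := if is_square then info ++ " (квадратная)" else info
  match min_val, max_val, sum_val with
  | some mn, some mx, some s =>
      info ++ "\nMin: " ++ PySem.Int.toStr mn ++ ", Max: " ++ PySem.Int.toStr mx ++ ", Sum: " ++ PySem.Int.toStr s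
  | _, _, _ => info

-- ===== PORT B =====
def get_matrix_info_alt (A : List (List Int)) : String :=
  if A = [] then "Пустая матрица" else
  let M : Int := A.length
  let N : Int := (A.headD []).length
  let ordered := PySem.List.sorted (A.flatMap (fun row => row)) (fun x => x) false
  let info := "Размер: " ++ PySem.Int.toStr M ++ "×" ++ PySem.Int.toStr N
  let info := if M == N then info ++ " (квадратная)" else info
  match ordered with
  | [] => info
  | x :: t =>
      -- ordered[0] is x, ordered[-1] is the last element (list known nonempty here)
      info ++ "\nMin: " ++ PySem.Int.toStr x ++ ", Max: " ++ PySem.Int.toStr (t.getLastD x)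
           ++ ", Sum: " ++ PySem.Int.toStr ((x :: t).foldl (· + ·) 0)

-- ===== PRECONDITION & SPEC =====
def Spec_get_matrix_info (A : List (List Int)) (out : String) : Prop := out = get_matrix_info_alt A
instance (A : List (List Int)) (out : String) : Decidable (Spec_get_matrix_info A out) := by unfold Spec_get_matrix_info; infer_instance

-- ===== CLAIM (what is proved, stated in full; the proofs are below) =====
def Claim_equal_get_matrix_info : Prop := ∀ (A : List (List Int)), Dom_get_matrix_info A → Spec_get_matrix_info A (get_matrix_info A)

-- ===== LEMMAS AND PROOFS =====

-- getLastD t x is an element of x :: t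
theorem pv_getLastD_mem (t : List Int) (x : Int) : t.getLastD x ∈ x :: t := by
  induction t generalizing x with
  | nil => simp
  | cons y t ih => rw [List.getLastD_cons]; exact List.mem_cons_of_mem _ (ih y)

-- in a pairwise-≤ list every element is ≤ the last one
theorem pv_le_getLastD (t : List Int) (x a : Int)
    (h : (x :: t).Pairwise (· ≤ ·)) (ha : a ∈ x :: t) : a ≤ t.getLastD x := by
  induction t generalizing x a with
  | nil => simp at ha; simp [ha]
  | cons y t ih =>
      rw [List.getLastD_cons]
      have h' : (y :: t).Pairwise (· ≤ ·) := h.tail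
      have hxy : x ≤ y := (List.pairwise_cons.mp h).1 y (by simp)
      rcases List.mem_cons.mp ha with rfl | ha'
      · exact le_trans hxy (ih y y h' (by simp))
      · exact ih y a h' ha'

theorem pv_foldl_add (l : List Int) (s : Int) : l.foldl (· + ·) s = s + l.sum := by
  induction l generalizing s with
  | nil => simp
  | cons x t ih => simp [ih]; ring

-- ===== VERDICT (by name: the statement is the Claim_ definition above) =====
theorem get_matrix_info_spec : Claim_equal_get_matrix_info := by
  intro A _
  unfold Spec_get_matrix_info get_matrix_info get_matrix_info_alt
  by_cases hA : A = []
  · simp [hA]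
  · simp only [hA, if_false]
    have hflat : A.flatMap (fun row => row) = A.flatMap id := rfl
    rw [hflat]
    cases hfe : A.flatMap id with
    | nil =>
        have hs : PySem.List.sorted ([] : List Int) (fun x => x) false = [] := by
          rw [PySem.List.sorted_eq_nil_iff]
        simp [PySem.List.min?, PySem.List.max?, hs]
    | cons y t0 =>
        have hsne : PySem.List.sorted (y :: t0) (fun x => x) false ≠ [] := by
          rw [Ne, PySem.List.sorted_eq_nil_iff]; simp
        cases hs : PySem.List.sorted (y :: t0) (fun x => x) false with
        | nil => exact absurd hs hsne
        | cons m r =>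
            have hperm : (m :: r).Perm (y :: t0) := by
              rw [← hs]; exact PySem.List.sorted_perm (y :: t0) (fun x => x) false
            have hmem_sorted : ∀ a, a ∈ m :: r → a ∈ y :: t0 :=
              fun a ha => hperm.mem_iff.mp ha
            -- min value: head of the sorted list = A's running min
            have hminA : PySem.List.min? (y :: t0) (fun x => x) = some (t0.foldl min y) :=
              PySem.List.min?_id_cons y t0
            have hmin_eq : t0.foldl min y = m :=
              le_antisymm (PySem.List.min?_isMin hminA m (hmem_sorted m (by simp)))
                (PySem.List.key_head_sorted_le (y :: t0) (fun x => x) hs _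
                  (PySem.List.min?_mem hminA))
            -- max value: last of the sorted list = A's running max
            have hpw : (m :: r).Pairwise (· ≤ ·) := by
              rw [← hs]
              exact PySem.List.sorted_pairwise (y :: t0) (fun x => x)
            have hmaxA : PySem.List.max? (y :: t0) (fun x => x) = some (t0.foldl max y) :=
              PySem.List.max?_id_cons y t0
            have hmax_eq : t0.foldl max y = r.getLastD m :=
              le_antisymm
                (pv_le_getLastD r m _ hpw
                  (hperm.mem_iff.mpr (PySem.List.max?_mem hmaxA)))
                (PySem.List.max?_isMax hmaxA _ (hmem_sorted _ (pv_getLastD_mem r m)))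
            -- sum: permutation-invariant
            have hsum : (y :: t0).foldl (· + ·) 0 = (m :: r).foldl (· + ·) 0 := by
              rw [pv_foldl_add, pv_foldl_add, hperm.sum_eq]
            rw [hminA, hmaxA]
            simp [hmin_eq, hmax_eq, ← hsum]
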